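-- pv_equiv track=rewrite | github.com/ariesco/tweetSuccess | src/definitions_computations/fixCharacters.py | countTerms
-- ===== SOURCE A (Python) =====
-- def countTerms (text, isReply):
--     words = text.split()
--     count = 0
--     endReply = not isReply
--
--     for word in words:
--         if not endReply and not word.startswith('@'):
--             endReply = True
--
--         if endReply:
--             if not word.startswith('https://') and not word.startswith('http://'):
--                 count += 1
--
--     return count
-- ===== SOURCE B (Python) =====
-- def _dropLeadingMentions(words):
--     while words and words[0].startswith('@'):
--         words = words[1:]
--     return words
--
-- def countTerms(text, isReply):
--     words = text.split()
--     rest = _dropLeadingMentions(words) if isReply else words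
--     return sum(1 for w in rest
--                if not (w.startswith('https://') or w.startswith('http://')))
-- ===== Notes on version B (the rewrite author's own statement) =====
-- stated objective: simpler
-- what changed: Replaced the single stateful loop with an endReply flag by two stateless passes: drop the leading run of '@'-words (only when isReply), then count the non-URL words in the remainder.
import Mathlib
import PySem

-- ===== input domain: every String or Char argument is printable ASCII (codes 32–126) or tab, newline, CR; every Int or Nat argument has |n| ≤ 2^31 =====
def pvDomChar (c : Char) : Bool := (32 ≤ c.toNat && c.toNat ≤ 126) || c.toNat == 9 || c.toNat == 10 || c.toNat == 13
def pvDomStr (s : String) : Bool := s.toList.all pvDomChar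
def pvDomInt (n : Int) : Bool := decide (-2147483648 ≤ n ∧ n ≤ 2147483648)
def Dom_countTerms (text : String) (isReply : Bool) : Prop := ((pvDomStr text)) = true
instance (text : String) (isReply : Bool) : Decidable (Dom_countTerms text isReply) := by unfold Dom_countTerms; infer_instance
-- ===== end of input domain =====

-- B replaces A's single stateful loop (endReply flag) with two stateless passes:
-- drop the leading '@'-run (when isReply), then count non-URL words; objective: simpler.


-- ===== PORT A =====
def countTermsStep (st : Int × Bool) (word : String) : Int × Bool :=
  let endReply := if !st.2 && !(PySem.Str.startswith word "@") then true else st.2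
  let count :=
    if endReply then
      if !(PySem.Str.startswith word "https://") && !(PySem.Str.startswith word "http://") then
        st.1 + 1
      else st.1
    else st.1
  (count, endReply)

def countTerms (text : String) (isReply : Bool) : Int :=
  let words := PySem.Str.split₀ text
  (words.foldl countTermsStep (0, !isReply)).1

-- ===== PORT B =====
def dropLeadingMentions : List String → List String
  | [] => []
  | w :: ws => if PySem.Str.startswith w "@" then dropLeadingMentions ws else w :: ws

def notUrl (w : String) : Bool :=
  !(PySem.Str.startswith w "https://" || PySem.Str.startswith w "http://")

def countTerms_alt (text : String) (isReply : Bool) : Int :=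
  let words := PySem.Str.split₀ text
  let rest := if isReply then dropLeadingMentions words else words
  ((rest.filter notUrl).length : Int)

-- ===== PRECONDITION & SPEC =====
def Spec_countTerms (text : String) (isReply : Bool) (out : Int) : Prop := out = countTerms_alt text isReply
instance (text : String) (isReply : Bool) (out : Int) : Decidable (Spec_countTerms text isReply out) := by unfold Spec_countTerms; infer_instance

-- ===== CLAIM (what is proved, stated in full; the proofs are below) =====
def Claim_equal_countTerms : Prop := ∀ (text : String) (isReply : Bool), Dom_countTerms text isReply → Spec_countTerms text isReply (countTerms text isReply)

-- ===== LEMMAS AND PROOFS =====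

-- Once the flag is true it stays true and every later word just counts.
theorem foldl_step_true (ws : List String) (c : Int) :
    (ws.foldl countTermsStep (c, true)).1 = c + ((ws.filter notUrl).length : Int) := by
  induction ws generalizing c with
  | nil => simp
  | cons w ws ih =>
    by_cases h1 : PySem.Str.startswith w "https://" <;>
    by_cases h2 : PySem.Str.startswith w "http://" <;>
    simp at h1 h2 <;>
    simp [countTermsStep, notUrl, h1, h2, ih] <;> omega

-- While the flag is false, leading '@'-words are skipped and the first other word flips it.
theorem foldl_step_false (ws : List String) (c : Int) :
    (ws.foldl countTermsStep (c, false)).1 =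
      c + (((dropLeadingMentions ws).filter notUrl).length : Int) := by
  induction ws generalizing c with
  | nil => simp [dropLeadingMentions]
  | cons w ws ih =>
    by_cases hat : PySem.Str.startswith w "@"
    · simp at hat
      simpa [countTermsStep, dropLeadingMentions, hat] using ih c
    · simp at hat
      by_cases h1 : PySem.Str.startswith w "https://" <;>
      by_cases h2 : PySem.Str.startswith w "http://" <;>
      simp at h1 h2 <;>
      simp [countTermsStep, dropLeadingMentions, notUrl, hat, h1, h2, foldl_step_true] <;> omega

-- ===== VERDICT (by name: the statement is the Claim_ definition above) =====
theorem countTerms_spec : Claim_equal_countTerms := by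
  intro text isReply _
  unfold Spec_countTerms countTerms countTerms_alt
  cases isReply with
  | true => simp [foldl_step_false]
  | false => simp [foldl_step_true]
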